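-- pv_equiv track=rewrite | github.com/akikuno/DAJIN2 | src/DAJIN2/core/preprocess/structural_variants/sv_handler.py | add_unique_allele_keys
-- ===== SOURCE A (Python) =====
-- def _check_duplicates_of_sets(set1: set[str], set2: set[str]) -> bool:
--     """if True, there are duplicates."""
--     union_set = set1.union(set2)
--     total_elements = len(set1) + len(set2)
--     return len(union_set) != total_elements
--
-- def add_unique_allele_keys(
--     fasta_sv_alleles: dict[str, str],
--     FASTA_ALLELES: dict[str, set],
--     key: str,
--     internal_suffix: str = "",
--     display_prefix: str = "DAJIN_",
-- ) -> tuple[dict[str, str], dict[str, str]]: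
--     """
--     Update keys to avoid duplicating user-specified alleles.
--     If the allele 'insertion01' exists in FASTA_ALLELES, increment the digits.
--     (insertion01 -> insertion001 -> insertion0001...)
--
--     Returns:
--         tuple[dict[str, str], dict[str, str]]:
--             - A dictionary whose keys are internal allele names (optionally suffixed with `internal_suffix`)
--             - A mapping from the internal allele name to the display allele name (prefixed with `display_prefix`)
--     """
--     user_defined_alleles = set(FASTA_ALLELES)
--     key_duplicated_alleles = {allele for allele in user_defined_alleles if key in allele}
--
--     if key_duplicated_alleles == set():
--         base_names = [f"{key}{(i + 1):02}" for i, _ in enumerate(fasta_sv_alleles.values())]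
--     else:
--         num_digits = 3  # 001
--         while True:
--             base_names = [f"{key}{(i + 1):0{num_digits}}" for i, _ in enumerate(fasta_sv_alleles)]
--             if not _check_duplicates_of_sets(set(base_names), key_duplicated_alleles):
--                 break
--             num_digits += 1
--
--     internal_names = [f"{name}__{internal_suffix}" if internal_suffix else name for name in base_names]
--     display_names = [f"{display_prefix}{name}" if display_prefix else name for name in base_names]
--
--     return dict(zip(internal_names, fasta_sv_alleles.values())), dict(zip(internal_names, display_names))
-- ===== SOURCE B (Python) =====
-- def add_unique_allele_keys(
--     fasta_sv_alleles: dict[str, str],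
--     FASTA_ALLELES: dict[str, set],
--     key: str,
--     internal_suffix: str = "",
--     display_prefix: str = "DAJIN_",
-- ) -> tuple[dict[str, str], dict[str, str]]:
--     """Same result as the original, but the zero-pad width is computed directly
--     from the colliding alleles instead of retrying ever-wider name lists."""
--     n = len(fasta_sv_alleles)
--     key_duplicated_alleles = [allele for allele in FASTA_ALLELES if key in allele]
--
--     if not key_duplicated_alleles:
--         width = 2
--     else:
--         numerals = {str(v) for v in range(1, n + 1)}
--         padded_widths = set()   # widths blocked only by a zero-padded suffix
--         max_exact = 0           # longest unpadded numeric suffix; blocks all widths <= it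
--         for allele in key_duplicated_alleles:
--             if not allele.startswith(key):
--                 continue
--             suffix = allele[len(key):]
--             trimmed = suffix.lstrip("0")
--             if trimmed not in numerals:
--                 continue
--             if len(trimmed) == len(suffix):
--                 max_exact = max(max_exact, len(suffix))
--             else:
--                 padded_widths.add(len(suffix))
--         width = 3
--         while width <= max_exact or width in padded_widths:
--             width += 1
--
--     base_names = [f"{key}{v:0{width}}" for v in range(1, n + 1)]
--     internal_names = [f"{name}__{internal_suffix}" if internal_suffix else name for name in base_names]
--     display_names = [f"{display_prefix}{name}" if display_prefix else name for name in base_names]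
--
--     values = list(fasta_sv_alleles.values())
--     return dict(zip(internal_names, values)), dict(zip(internal_names, display_names))
-- ===== Notes on version B (the rewrite author's own statement) =====
-- stated objective: alternative
-- what changed: Instead of retrying ever-wider name lists and set-checking each against the user alleles, B scans the colliding alleles once, classifies each numeric suffix (exact or zero-padded, value in 1..n) into blocked pad widths, and picks the smallest free width >= 3 directly before building the name list once.
import Mathlib
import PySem

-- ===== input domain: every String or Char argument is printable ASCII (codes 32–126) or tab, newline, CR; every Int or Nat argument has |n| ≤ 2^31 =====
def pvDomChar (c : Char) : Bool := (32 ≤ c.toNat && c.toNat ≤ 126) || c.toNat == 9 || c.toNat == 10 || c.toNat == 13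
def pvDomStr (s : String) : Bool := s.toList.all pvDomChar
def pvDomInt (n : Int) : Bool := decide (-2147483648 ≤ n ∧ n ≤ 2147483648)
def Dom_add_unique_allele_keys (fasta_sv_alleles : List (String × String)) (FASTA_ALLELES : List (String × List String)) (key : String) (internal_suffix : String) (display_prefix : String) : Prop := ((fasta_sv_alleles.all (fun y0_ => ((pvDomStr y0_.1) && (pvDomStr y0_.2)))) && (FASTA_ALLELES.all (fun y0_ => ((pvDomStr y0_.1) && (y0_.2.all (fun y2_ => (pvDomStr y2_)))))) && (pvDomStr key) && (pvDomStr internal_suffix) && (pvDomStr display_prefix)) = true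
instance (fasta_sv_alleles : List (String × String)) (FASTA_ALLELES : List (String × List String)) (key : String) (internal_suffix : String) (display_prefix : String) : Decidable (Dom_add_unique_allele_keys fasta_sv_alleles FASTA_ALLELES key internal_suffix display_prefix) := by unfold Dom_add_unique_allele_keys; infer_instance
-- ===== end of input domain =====

-- B computes the minimal zero-pad width directly from the colliding alleles' numeric
-- suffixes in one pass, instead of A's retry loop that rebuilds the whole candidate
-- name list and set-checks it at every width (objective: alternative algorithm).

-- ===== PORT A =====

-- port of A's helper _check_duplicates_of_sets
def pyCheckDupSets (set1 set2 : PySem.Set String) : Bool :=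
  let union_set := PySem.Set.union set1 set2
  let total_elements := PySem.Set.len set1 + PySem.Set.len set2
  PySem.Set.len union_set != total_elements

-- termination helpers/lemmas for A's while-loop (cited in decreasing_by)
def aMaxLen (dup : List String) : Nat := dup.foldr (fun a m => max a.toList.length m) 0

theorem aMaxLen_le {a : String} : ∀ {dup : List String}, a ∈ dup → a.toList.length ≤ aMaxLen dup := by
  intro dup
  induction dup with
  | nil => intro h; cases h
  | cons x xs ih =>
    intro h
    rcases List.mem_cons.1 h with h | h
    · simp [aMaxLen, h]
    · simp only [aMaxLen, List.foldr_cons]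
      exact le_trans (ih h) (le_max_right _ _)

theorem aCheck_true_exists {base dup : List String} (hdup : dup.Nodup)
    (h : pyCheckDupSets (PySem.Set.ofList base) dup = true) : ∃ a ∈ dup, a ∈ base := by
  by_contra hno
  push Not at hno
  have hup : PySem.Set.update (PySem.Set.ofList base) dup = PySem.Set.ofList base ++ dup :=
    PySem.Set.update_eq_append_of_disjoint _ _ hdup (fun x hx hmem => hno x hx ((PySem.Set.mem_ofList _ _).1 hmem))
  simp [pyCheckDupSets, PySem.Set.union, hup, PySem.Set.len] at h

theorem aLoop_dec {xs : List String} {key : String} {dup : List String} {w : Nat}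
    (hdup : dup.Nodup)
    (h : ¬ pyCheckDupSets (PySem.Set.ofList (xs.zipIdx.map (fun p => key ++ PySem.Str.zfill (PySem.Int.toStr ((p.2 : Int) + 1)) (w : Int)))) dup = false) :
    w ≤ aMaxLen dup := by
  rw [Bool.not_eq_false] at h
  obtain ⟨a, ha, hmem⟩ := aCheck_true_exists hdup h
  obtain ⟨p, _, rfl⟩ := List.mem_map.1 hmem
  have hz : (PySem.Chars.zfill (PySem.Int.toStr ((p.2 : Int) + 1)).toList ((w : Nat) : Int)).length = max (PySem.Int.toStr ((p.2 : Int) + 1)).toList.length (((w : Nat) : Int)).toNat :=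
    PySem.Chars.length_zfill _ _
  simp only [Int.toNat_natCast] at hz
  have hlen : w ≤ (key ++ PySem.Str.zfill (PySem.Int.toStr ((p.2 : Int) + 1)) (w : Int)).toList.length := by
    rw [String.toList_append, List.length_append, PySem.Str.toList_zfill, hz]
    omega
  exact le_trans hlen (aMaxLen_le ha)

-- A's while-loop (num_digits = 3, 4, …); the Nodup hypothesis carries the set invariant for termination
def aLoop (xs : List String) (key : String) (dup : PySem.Set String) (hdup : dup.Nodup) (w : Nat) : List String :=
  let base_names := xs.zipIdx.map (fun p => key ++ PySem.Str.zfill (PySem.Int.toStr ((p.2 : Int) + 1)) (w : Int))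
  if pyCheckDupSets (PySem.Set.ofList base_names) dup = false then base_names
  else aLoop xs key dup hdup (w + 1)
termination_by aMaxLen dup + 1 - w
decreasing_by
  rename_i h
  have := aLoop_dec hdup h
  omega

def add_unique_allele_keys (fasta_sv_alleles : List (String × String)) (FASTA_ALLELES : List (String × List String)) (key : String) (internal_suffix : String) (display_prefix : String) : (List (String × String)) × (List (String × String)) :=
  let fsa := PySem.Dict.ofList fasta_sv_alleles
  let user_defined_alleles : PySem.Set String := PySem.Set.ofList (PySem.Dict.ofList FASTA_ALLELES).keys
  let key_duplicated_alleles : PySem.Set String := PySem.Set.ofList (user_defined_alleles.filter (fun allele => PySem.Str.isIn key allele))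
  let base_names : List String :=
    if PySem.Set.equal key_duplicated_alleles PySem.Set.empty then
      fsa.values.zipIdx.map (fun p => key ++ PySem.Str.zfill (PySem.Int.toStr ((p.2 : Int) + 1)) (2 : Int))
    else
      aLoop fsa.keys key key_duplicated_alleles (PySem.Set.nodup_ofList _) 3
  let internal_names := base_names.map (fun name => if internal_suffix ≠ "" then name ++ "__" ++ internal_suffix else name)
  let display_names := base_names.map (fun name => if display_prefix ≠ "" then display_prefix ++ name else name)
  ((PySem.Dict.ofList (internal_names.zip fsa.values)).items,
   (PySem.Dict.ofList (internal_names.zip display_names)).items)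

-- ===== PORT B =====

-- hand port of s.lstrip("0") (PySem has no lstrip-with-chars): drops exactly the leading '0's
def bLstripZeros (s : String) : String := String.ofList (s.toList.dropWhile (· == '0'))

-- one pass over the colliding alleles: collect zero-padded suffix widths and the longest unpadded numeric suffix
def bScan (dup : List String) (key : String) (numerals : PySem.Set String) : PySem.Set Nat × Nat :=
  dup.foldl (fun acc allele =>
    if PySem.Str.startswith allele key then
      let suffix := PySem.Str.slice allele (some (PySem.Str.len key)) none
      let trimmed := bLstripZeros suffix
      if PySem.Set.contains numerals trimmed then
        if PySem.Str.len trimmed == PySem.Str.len suffix then (acc.1, max acc.2 suffix.toList.length)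
        else (PySem.Set.add acc.1 suffix.toList.length, acc.2)
      else acc
    else acc) (PySem.Set.empty, 0)

-- termination helper/lemma for B's width-search loop (cited in decreasing_by)
def bMaxPad (padded : List Nat) : Nat := padded.foldr max 0

theorem bMaxPad_le {w : Nat} : ∀ {padded : List Nat}, w ∈ padded → w ≤ bMaxPad padded := by
  intro padded
  induction padded with
  | nil => intro h; cases h
  | cons x xs ih =>
    intro h
    rcases List.mem_cons.1 h with h | h
    · simp [bMaxPad, h]
    · simp only [bMaxPad, List.foldr_cons]
      exact le_trans (ih h) (le_max_right _ _)

-- B's while-loop: smallest width ≥ 3 that is neither blocked by an exact suffix nor a padded one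
def bWidth (padded : PySem.Set Nat) (maxExact : Nat) (w : Nat) : Nat :=
  if w ≤ maxExact ∨ w ∈ padded then bWidth padded maxExact (w + 1) else w
termination_by max maxExact (bMaxPad padded) + 1 - w
decreasing_by
  rename_i h
  rcases h with h | h
  · omega
  · have := bMaxPad_le h; omega

def add_unique_allele_keys_alt (fasta_sv_alleles : List (String × String)) (FASTA_ALLELES : List (String × List String)) (key : String) (internal_suffix : String) (display_prefix : String) : (List (String × String)) × (List (String × String)) :=
  let fsa := PySem.Dict.ofList fasta_sv_alleles
  let n : Int := PySem.Dict.size fsa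
  let key_duplicated_alleles : List String := (PySem.Dict.ofList FASTA_ALLELES).keys.filter (fun allele => PySem.Str.isIn key allele)
  let width : Nat :=
    if key_duplicated_alleles = [] then 2
    else
      let numerals : PySem.Set String := PySem.Set.ofList ((PySem.List.pyRange 1 (n + 1) 1).map (fun v => PySem.Int.toStr v))
      let sc := bScan key_duplicated_alleles key numerals
      bWidth sc.1 sc.2 3
  let base_names := (PySem.List.pyRange 1 (n + 1) 1).map (fun v => key ++ PySem.Str.zfill (PySem.Int.toStr v) (width : Int))
  let internal_names := base_names.map (fun name => if internal_suffix ≠ "" then name ++ "__" ++ internal_suffix else name)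
  let display_names := base_names.map (fun name => if display_prefix ≠ "" then display_prefix ++ name else name)
  ((PySem.Dict.ofList (internal_names.zip fsa.values)).items,
   (PySem.Dict.ofList (internal_names.zip display_names)).items)

-- ===== PRECONDITION & SPEC =====
def Spec_add_unique_allele_keys (fasta_sv_alleles : List (String × String)) (FASTA_ALLELES : List (String × List String)) (key : String) (internal_suffix : String) (display_prefix : String) (out : (List (String × String)) × (List (String × String))) : Prop := out = add_unique_allele_keys_alt fasta_sv_alleles FASTA_ALLELES key internal_suffix display_prefix
instance (fasta_sv_alleles : List (String × String)) (FASTA_ALLELES : List (String × List String)) (key : String) (internal_suffix : String) (display_prefix : String) (out : (List (String × String)) × (List (String × String))) : Decidable (Spec_add_unique_allele_keys fasta_sv_alleles FASTA_ALLELES key internal_suffix display_prefix out) := by unfold Spec_add_unique_allele_keys; infer_instance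

-- ===== CLAIM (what is proved, stated in full; the proofs are below) =====
def Claim_equal_add_unique_allele_keys : Prop := ∀ (fasta_sv_alleles : List (String × String)) (FASTA_ALLELES : List (String × List String)) (key : String) (internal_suffix : String) (display_prefix : String), Dom_add_unique_allele_keys fasta_sv_alleles FASTA_ALLELES key internal_suffix display_prefix → Spec_add_unique_allele_keys fasta_sv_alleles FASTA_ALLELES key internal_suffix display_prefix (add_unique_allele_keys fasta_sv_alleles FASTA_ALLELES key internal_suffix display_prefix)

-- ===== LEMMAS AND PROOFS =====

-- canonical name list: what both ports' comprehensions compute at width w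
def pvNames (key : String) (m w : Nat) : List String :=
  (List.range m).map (fun (i : Nat) => key ++ PySem.Str.zfill (PySem.Int.toStr ((i : Int) + 1)) (w : Int))

theorem pvNames_zipIdx (key : String) {α : Type} (xs : List α) (w : Nat) :
    xs.zipIdx.map (fun p => key ++ PySem.Str.zfill (PySem.Int.toStr ((p.2 : Int) + 1)) (w : Int)) = pvNames key xs.length w := by
  apply List.ext_getElem
  · simp [pvNames]
  · intro i h1 h2
    simp only [pvNames, List.getElem_map, List.getElem_zipIdx, List.getElem_range, zero_add]

theorem pvNames_pyRange (key : String) (m w : Nat) :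
    (PySem.List.pyRange 1 ((m : Int) + 1) 1).map (fun v => key ++ PySem.Str.zfill (PySem.Int.toStr v) (w : Int)) = pvNames key m w := by
  unfold pvNames PySem.List.pyRange
  rcases Nat.eq_zero_or_pos m with rfl | hm
  · simp
  · have h1 : (1:Int) < (m:Int) + 1 := by omega
    simp only [if_neg one_ne_zero, if_pos zero_lt_one, if_pos h1]
    have h2 : (((m:Int) + 1 - 1 + 1 - 1) / 1).toNat = m := by omega
    rw [h2, List.map_map]
    apply List.map_congr_left
    intro i hi
    simp only [Function.comp]
    ring_nf

theorem pvTdcore_append : ∀ (f n : Nat) (l : List Char), Nat.toDigitsCore 10 f n l = Nat.toDigitsCore 10 f n [] ++ l := by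
  intro f
  induction f with
  | zero => intro n l; simp [Nat.toDigitsCore]
  | succ f ih =>
    intro n l
    simp only [Nat.toDigitsCore]
    by_cases h : n / 10 = 0
    · simp [h]
    · simp only [h, if_false]
      rw [ih (n/10) (Nat.digitChar (n % 10) :: l), ih (n/10) [Nat.digitChar (n % 10)]]
      simp

theorem pvTdcore_head : ∀ (f n : Nat), 0 < n → n ≤ f → ∃ c cs, Nat.toDigitsCore 10 f n [] = c :: cs ∧ c ≠ '0' ∧ c ≠ '+' ∧ c ≠ '-' := by
  intro f
  induction f with
  | zero => intro n h1 h2; omega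
  | succ f ih =>
    intro n h1 h2
    simp only [Nat.toDigitsCore]
    by_cases h : n / 10 = 0
    · have hlt : n < 10 := by omega
      have hmod : n % 10 = n := Nat.mod_eq_of_lt hlt
      rw [h, if_pos rfl, hmod]
      refine ⟨Nat.digitChar n, [], rfl, ?_⟩
      interval_cases n <;> decide
    · have h10 : 10 ≤ n := by
        by_contra hh
        exact h (Nat.div_eq_of_lt (by omega))
      have hd1 : 0 < n / 10 := Nat.div_pos h10 (by norm_num)
      have hd2 : n / 10 ≤ f := by
        have := Nat.div_lt_self h1 (by norm_num : 1 < 10)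
        omega
      obtain ⟨c, cs, heq, hc⟩ := ih (n/10) hd1 hd2
      rw [if_neg h, pvTdcore_append]
      exact ⟨c, cs ++ [Nat.digitChar (n % 10)], by rw [heq]; simp, hc⟩

-- leading digit of a positive integer: nonempty, not '0', not a sign
theorem pvToChars_pos {v : Int} (hv : 1 ≤ v) :
    ∃ c cs, PySem.Int.toChars v = c :: cs ∧ c ≠ '0' ∧ c ≠ '+' ∧ c ≠ '-' := by
  unfold PySem.Int.toChars
  rw [if_neg (by omega)]
  unfold Nat.toDigits
  exact pvTdcore_head (v.toNat + 1) v.toNat (by omega) (by omega)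

-- A's set-duplication check, characterised (dup without duplicates)
theorem pvCheck_iff {base dup : List String} (hdup : dup.Nodup) :
    pyCheckDupSets (PySem.Set.ofList base) dup = true ↔ ∃ a ∈ dup, a ∈ base := by
  constructor
  · exact aCheck_true_exists hdup
  · rintro ⟨a, ha, hmem⟩
    by_contra hfalse
    rw [Bool.not_eq_true] at hfalse
    unfold pyCheckDupSets at hfalse
    have hself : PySem.Set.ofList dup = dup := PySem.Set.ofList_eq_self_of_nodup dup hdup
    simp only [PySem.Set.union, PySem.Set.update_eq_append_filter, hself, PySem.Set.len,
      List.length_append, bne_eq_false_iff_eq] at hfalse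
    push_cast at hfalse
    have hlen : (List.filter (fun y => !(PySem.Set.ofList base).contains y) dup).length = dup.length := by omega
    rw [List.length_filter_eq_length_iff] at hlen
    have h2 := hlen a ha
    have h3 := (PySem.Set.contains_iff (PySem.Set.ofList base) a).2 ((PySem.Set.mem_ofList base a).2 hmem)
    rw [h3] at h2
    simp at h2

theorem pvNames_mem_le {a key : String} {m w : Nat} (h : a ∈ pvNames key m w) : w ≤ a.toList.length := by
  obtain ⟨i, _, rfl⟩ := List.mem_map.1 h
  rw [String.toList_append, List.length_append, PySem.Str.toList_zfill]
  have hz := PySem.Chars.length_zfill (PySem.Int.toStr ((i : Int) + 1)).toList ((w : Nat) : Int)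
  simp only [Int.toNat_natCast] at hz
  omega

-- the string-level heart: membership of a in the width-w name list, characterised by a's suffix shape
def pvSuffix (a key : String) : String := PySem.Str.slice a (some (PySem.Str.len key)) none

def pvExactP (a key : String) (numerals : PySem.Set String) : Prop :=
  PySem.Str.startswith a key = true ∧ PySem.Set.contains numerals (bLstripZeros (pvSuffix a key)) = true ∧
    (PySem.Str.len (bLstripZeros (pvSuffix a key)) == PySem.Str.len (pvSuffix a key)) = true

def pvPadP (a key : String) (numerals : PySem.Set String) : Prop :=
  PySem.Str.startswith a key = true ∧ PySem.Set.contains numerals (bLstripZeros (pvSuffix a key)) = true ∧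
    ¬ (PySem.Str.len (bLstripZeros (pvSuffix a key)) == PySem.Str.len (pvSuffix a key)) = true

theorem pvDropWhile_rep (k : Nat) (l : List Char) :
    List.dropWhile (· == '0') (List.replicate k '0' ++ l) = List.dropWhile (· == '0') l := by
  induction k with
  | zero => rfl
  | succ k ih => simp [List.replicate_succ, ih]

theorem pvZfill_pos {v : Int} (hv : 1 ≤ v) (w : Nat) :
    PySem.Chars.zfill (PySem.Int.toChars v) ((w : Nat) : Int) =
      List.replicate (w - (PySem.Int.toChars v).length) '0' ++ PySem.Int.toChars v := by
  obtain ⟨c, cs, hD, h0, hp, hm⟩ := pvToChars_pos hv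
  unfold PySem.Chars.zfill
  by_cases h : ((w : Nat) : Int) ≤ ((PySem.Int.toChars v).length : Int)
  · rw [if_pos h]
    have hz : w - (PySem.Int.toChars v).length = 0 := by omega
    rw [hz]
    simp
  · rw [if_neg h, hD]
    dsimp only
    rw [if_neg (by simp [hp, hm]), Int.toNat_natCast, ← hD]

theorem pvSuffix_toList (a key : String) :
    (pvSuffix a key).toList = a.toList.drop key.toList.length := by
  unfold pvSuffix
  rw [PySem.Str.toList_slice, PySem.Chars.slice_eq_listSlice]
  have h : PySem.Str.len key = ((key.toList.length : Nat) : Int) := rfl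
  rw [h, PySem.List.slice_from_natCast]

theorem pvName_eq_iff (a key : String) (v : Int) (w : Nat) :
    a = key ++ PySem.Str.zfill (PySem.Int.toStr v) ((w : Nat) : Int) ↔
      PySem.Str.startswith a key = true ∧
        (pvSuffix a key).toList = PySem.Chars.zfill (PySem.Int.toChars v) ((w : Nat) : Int) := by
  constructor
  · rintro rfl
    constructor
    · rw [PySem.Str.startswith, PySem.Chars.startswith_iff]
      exact ⟨_, (String.toList_append).symm⟩
    · rw [pvSuffix_toList, String.toList_append, List.drop_left, PySem.Str.toList_zfill,
        PySem.Int.toList_toStr]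
  · rintro ⟨h1, h2⟩
    have hpre : key.toList <+: a.toList := (PySem.Chars.startswith_iff _ _).1 h1
    have hdec := List.prefix_iff_eq_append.1 hpre
    rw [← String.toList_inj, String.toList_append, PySem.Str.toList_zfill, PySem.Int.toList_toStr,
      ← h2, pvSuffix_toList, hdec]

theorem pvMem_names_iff (a key : String) (m w : Nat)
    (numerals : PySem.Set String)
    (hnum : ∀ t, PySem.Set.contains numerals t = true ↔ ∃ v : Int, 1 ≤ v ∧ v ≤ (m : Int) ∧ t = PySem.Int.toStr v) :
    a ∈ pvNames key m w ↔
      (pvExactP a key numerals ∧ w ≤ (pvSuffix a key).toList.length) ∨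
      (pvPadP a key numerals ∧ (pvSuffix a key).toList.length = w) := by
  have hTS : (bLstripZeros (pvSuffix a key)).toList = (pvSuffix a key).toList.dropWhile (· == '0') := by
    rw [bLstripZeros, String.toList_ofList]
  constructor
  · intro hmem
    obtain ⟨i, hi, rfl⟩ := List.mem_map.1 hmem
    rw [List.mem_range] at hi
    have hv1 : (1 : Int) ≤ (i : Int) + 1 := by omega
    have hv2 : (i : Int) + 1 ≤ (m : Int) := by omega
    obtain ⟨c, cs, hD, h0, hp, hm'⟩ := pvToChars_pos hv1
    have hzf := pvZfill_pos hv1 w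
    obtain ⟨hsw, hsuf⟩ := (pvName_eq_iff _ key ((i : Int) + 1) w).1 rfl
    have hSeq : (pvSuffix (key ++ PySem.Str.zfill (PySem.Int.toStr ((i : Int) + 1)) ((w : Nat) : Int)) key).toList
        = List.replicate (w - (PySem.Int.toChars ((i : Int) + 1)).length) '0' ++ PySem.Int.toChars ((i : Int) + 1) := by
      rw [hsuf, hzf]
    have hT : (bLstripZeros (pvSuffix (key ++ PySem.Str.zfill (PySem.Int.toStr ((i : Int) + 1)) ((w : Nat) : Int)) key)).toList
        = PySem.Int.toChars ((i : Int) + 1) := by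
      rw [hTS, hSeq, pvDropWhile_rep, hD, List.dropWhile_cons_of_neg (by simp [h0])]
    have htrim : bLstripZeros (pvSuffix (key ++ PySem.Str.zfill (PySem.Int.toStr ((i : Int) + 1)) ((w : Nat) : Int)) key)
        = PySem.Int.toStr ((i : Int) + 1) := by
      rw [← String.toList_inj, hT, PySem.Int.toList_toStr]
    have hcont := (hnum _).2 ⟨(i : Int) + 1, hv1, hv2, htrim⟩
    have hDne : (PySem.Int.toChars ((i : Int) + 1)).length ≠ 0 := by rw [hD]; simp
    have hlenS : (pvSuffix (key ++ PySem.Str.zfill (PySem.Int.toStr ((i : Int) + 1)) ((w : Nat) : Int)) key).toList.length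
        = max (PySem.Int.toChars ((i : Int) + 1)).length w := by
      rw [hSeq, List.length_append, List.length_replicate]
      omega
    by_cases hcase : w ≤ (PySem.Int.toChars ((i : Int) + 1)).length
    · left
      refine ⟨⟨hsw, hcont, ?_⟩, by omega⟩
      have hls : (pvSuffix (key ++ PySem.Str.zfill (PySem.Int.toStr ((i : Int) + 1)) ((w : Nat) : Int)) key).toList.length
          = (PySem.Int.toChars ((i : Int) + 1)).length := by omega
      simp only [PySem.Str.len, hT, hls, beq_self_eq_true]
    · right
      refine ⟨⟨hsw, hcont, ?_⟩, by omega⟩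
      simp only [PySem.Str.len, hT, beq_iff_eq, Nat.cast_inj]
      omega
  · intro hcase
    have hsw : PySem.Str.startswith a key = true := by
      rcases hcase with ⟨⟨h, _, _⟩, _⟩ | ⟨⟨h, _, _⟩, _⟩ <;> exact h
    have hcont : PySem.Set.contains numerals (bLstripZeros (pvSuffix a key)) = true := by
      rcases hcase with ⟨⟨_, h, _⟩, _⟩ | ⟨⟨_, h, _⟩, _⟩ <;> exact h
    obtain ⟨v, hv1, hv2, ht⟩ := (hnum _).1 hcont
    have hT : (pvSuffix a key).toList.dropWhile (· == '0') = PySem.Int.toChars v := by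
      rw [← hTS, ht, PySem.Int.toList_toStr]
    have hsplit := List.takeWhile_append_dropWhile (p := (· == '0')) (l := (pvSuffix a key).toList)
    have hlen0 : ((pvSuffix a key).toList.takeWhile (· == '0')).length
        = (pvSuffix a key).toList.length - (PySem.Int.toChars v).length := by
      have := congrArg List.length hsplit
      rw [List.length_append, hT] at this
      omega
    have hDle : (PySem.Int.toChars v).length ≤ (pvSuffix a key).toList.length := by
      have := congrArg List.length hsplit
      rw [List.length_append, hT] at this
      omega
    have htw : (pvSuffix a key).toList.takeWhile (· == '0')
        = List.replicate ((pvSuffix a key).toList.length - (PySem.Int.toChars v).length) '0' :=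
      List.eq_replicate_iff.2 ⟨hlen0, fun b hb => by simpa using List.mem_takeWhile_imp hb⟩
    have hSeq : (pvSuffix a key).toList
        = List.replicate ((pvSuffix a key).toList.length - (PySem.Int.toChars v).length) '0'
            ++ PySem.Int.toChars v := by
      rw [← htw, ← hT, hsplit]
    have hlift : ∀ hw' : (pvSuffix a key).toList
          = PySem.Chars.zfill (PySem.Int.toChars v) ((w : Nat) : Int), a ∈ pvNames key m w := by
      intro hw'
      have ha : a = key ++ PySem.Str.zfill (PySem.Int.toStr v) ((w : Nat) : Int) :=
        (pvName_eq_iff a key v w).2 ⟨hsw, hw'⟩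
      have hveq : (((v - 1).toNat : Nat) : Int) + 1 = v := by omega
      refine List.mem_map.2 ⟨(v - 1).toNat, List.mem_range.2 (by omega), ?_⟩
      rw [hveq, ← ha]
    rcases hcase with ⟨⟨_, _, hbeq⟩, hwle⟩ | ⟨⟨_, _, hbeq⟩, hlen⟩
    · -- exact suffix: no leading zeros and w ≤ |S|
      have hTeq : (PySem.Int.toChars v).length = (pvSuffix a key).toList.length := by
        simp only [PySem.Str.len, beq_iff_eq, Nat.cast_inj, hTS, hT] at hbeq
        exact hbeq
      apply hlift
      rw [pvZfill_pos hv1 w]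
      have h0 : w - (PySem.Int.toChars v).length = 0 := by omega
      rw [h0]
      simp only [List.replicate_zero, List.nil_append]
      have hrep0 : (pvSuffix a key).toList.length - (PySem.Int.toChars v).length = 0 := by omega
      rw [hSeq, hrep0]
      simp
    · -- zero-padded suffix of length exactly w
      have hTne : (PySem.Int.toChars v).length ≠ (pvSuffix a key).toList.length := by
        simp only [PySem.Str.len, beq_iff_eq, Nat.cast_inj, hTS, hT] at hbeq
        exact hbeq
      apply hlift
      rw [pvZfill_pos hv1 w, hSeq, hlen]
  

-- characterisation of B's scan accumulator
def pvStep (key : String) (numerals : PySem.Set String) (acc : PySem.Set Nat × Nat) (allele : String) : PySem.Set Nat × Nat :=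
  if PySem.Str.startswith allele key then
    let suffix := PySem.Str.slice allele (some (PySem.Str.len key)) none
    let trimmed := bLstripZeros suffix
    if PySem.Set.contains numerals trimmed then
      if PySem.Str.len trimmed == PySem.Str.len suffix then (acc.1, max acc.2 suffix.toList.length)
      else (PySem.Set.add acc.1 suffix.toList.length, acc.2)
    else acc
  else acc

theorem pvBScan_eq (dup : List String) (key : String) (numerals : PySem.Set String) :
    bScan dup key numerals = dup.foldl (pvStep key numerals) (PySem.Set.empty, 0) := rfl

theorem pvOrSkip {A B C : Prop} (hB : ¬ B) : (A ∨ C) ↔ A ∨ (B ∨ C) :=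
  ⟨fun h => h.elim Or.inl (fun c => Or.inr (Or.inr c)),
   fun h => h.elim Or.inl (fun h => h.elim (fun b => absurd b hB) Or.inr)⟩

set_option maxHeartbeats 2000000 in
theorem pvScan_aux (key : String) (numerals : PySem.Set String) :
    ∀ (dup : List String) (acc : PySem.Set Nat × Nat),
      acc.1.Nodup →
      ((dup.foldl (pvStep key numerals) acc).1.Nodup ∧
       (∀ x, x ∈ (dup.foldl (pvStep key numerals) acc).1 ↔
          x ∈ acc.1 ∨ ∃ a ∈ dup, pvPadP a key numerals ∧ (pvSuffix a key).toList.length = x) ∧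
       (∀ w, w ≤ (dup.foldl (pvStep key numerals) acc).2 ↔
          w ≤ acc.2 ∨ ∃ a ∈ dup, pvExactP a key numerals ∧ w ≤ (pvSuffix a key).toList.length)) := by
  intro dup
  induction dup with
  | nil => intro acc h; simp [h]
  | cons a dup ih =>
    intro acc hnd
    rw [List.foldl_cons]
    by_cases h1 : PySem.Str.startswith a key = true
    · by_cases h2 : PySem.Set.contains numerals (bLstripZeros (pvSuffix a key)) = true
      · by_cases h3 : (PySem.Str.len (bLstripZeros (pvSuffix a key)) == PySem.Str.len (pvSuffix a key)) = true
        · -- exact branch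
          have h2' : PySem.Set.contains numerals (bLstripZeros (PySem.Str.slice a (some (PySem.Str.len key)) none)) = true := h2
          have h3' : (PySem.Str.len (bLstripZeros (PySem.Str.slice a (some (PySem.Str.len key)) none)) == PySem.Str.len (PySem.Str.slice a (some (PySem.Str.len key)) none)) = true := h3
          have hstep : pvStep key numerals acc a = (acc.1, max acc.2 (pvSuffix a key).toList.length) := by
            simp only [pvStep]
            rw [if_pos h1]
            rw [if_pos h2', if_pos h3']
            rfl
          obtain ⟨ihn, ihf, ihs⟩ := ih (pvStep key numerals acc a) (by rw [hstep]; exact hnd)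
          refine ⟨ihn, ?_, ?_⟩
          · intro x
            rw [ihf, hstep, List.exists_mem_cons_iff]
            have hnot : ¬ (pvPadP a key numerals ∧ (pvSuffix a key).toList.length = x) := by
              rintro ⟨⟨_, _, hb⟩, _⟩; exact hb h3
            exact pvOrSkip hnot
          · intro w
            rw [ihs, hstep, List.exists_mem_cons_iff]
            have hex : pvExactP a key numerals := ⟨h1, h2, h3⟩
            constructor
            · rintro (hm | h)
              · rcases le_max_iff.1 hm with h | h
                · exact Or.inl h
                · exact Or.inr (Or.inl ⟨hex, h⟩)
              · exact Or.inr (Or.inr h)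
            · rintro (h | ⟨⟨_, _, _⟩, h⟩ | h)
              · exact Or.inl (le_max_iff.2 (Or.inl h))
              · exact Or.inl (le_max_iff.2 (Or.inr h))
              · exact Or.inr h
        · -- padded branch
          have h2' : PySem.Set.contains numerals (bLstripZeros (PySem.Str.slice a (some (PySem.Str.len key)) none)) = true := h2
          have h3' : ¬ (PySem.Str.len (bLstripZeros (PySem.Str.slice a (some (PySem.Str.len key)) none)) == PySem.Str.len (PySem.Str.slice a (some (PySem.Str.len key)) none)) = true := h3
          have hstep : pvStep key numerals acc a = (PySem.Set.add acc.1 (pvSuffix a key).toList.length, acc.2) := by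
            simp only [pvStep]
            rw [if_pos h1]
            rw [if_pos h2', if_neg h3']
            rfl
          obtain ⟨ihn, ihf, ihs⟩ := ih (pvStep key numerals acc a) (by rw [hstep]; exact PySem.Set.nodup_add _ _ hnd)
          refine ⟨ihn, ?_, ?_⟩
          · intro x
            rw [ihf, hstep, List.exists_mem_cons_iff]
            have hpad : pvPadP a key numerals := ⟨h1, h2, h3⟩
            have hadd : x ∈ PySem.Set.add acc.1 (pvSuffix a key).toList.length ↔
                x ∈ acc.1 ∨ x = (pvSuffix a key).toList.length := PySem.Set.mem_add _ _ _
            rw [hadd]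
            constructor
            · rintro ((h | h) | h)
              · exact Or.inl h
              · exact Or.inr (Or.inl ⟨hpad, h.symm⟩)
              · exact Or.inr (Or.inr h)
            · rintro (h | ⟨_, h⟩ | h)
              · exact Or.inl (Or.inl h)
              · exact Or.inl (Or.inr h.symm)
              · exact Or.inr h
          · intro w
            rw [ihs, hstep, List.exists_mem_cons_iff]
            have hnot : ¬ (pvExactP a key numerals ∧ w ≤ (pvSuffix a key).toList.length) := by
              rintro ⟨⟨_, _, hb⟩, _⟩; exact h3 hb
            exact pvOrSkip hnot
      · have h2' : ¬ PySem.Set.contains numerals (bLstripZeros (PySem.Str.slice a (some (PySem.Str.len key)) none)) = true := h2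
        have hstep : pvStep key numerals acc a = acc := by
          simp only [pvStep]
          rw [if_pos h1]
          rw [if_neg h2']
        obtain ⟨ihn, ihf, ihs⟩ := ih (pvStep key numerals acc a) (by rw [hstep]; exact hnd)
        refine ⟨ihn, ?_, ?_⟩
        · intro x
          rw [ihf, hstep, List.exists_mem_cons_iff]
          have hnot : ¬ (pvPadP a key numerals ∧ (pvSuffix a key).toList.length = x) := by
            rintro ⟨⟨_, hb, _⟩, _⟩; exact h2 hb
          exact pvOrSkip hnot
        · intro w
          rw [ihs, hstep, List.exists_mem_cons_iff]
          have hnot : ¬ (pvExactP a key numerals ∧ w ≤ (pvSuffix a key).toList.length) := by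
            rintro ⟨⟨_, hb, _⟩, _⟩; exact h2 hb
          exact pvOrSkip hnot
    · have hstep : pvStep key numerals acc a = acc := by
        simp only [pvStep]
        rw [if_neg h1]
      obtain ⟨ihn, ihf, ihs⟩ := ih (pvStep key numerals acc a) (by rw [hstep]; exact hnd)
      refine ⟨ihn, ?_, ?_⟩
      · intro x
        rw [ihf, hstep, List.exists_mem_cons_iff]
        have hnot : ¬ (pvPadP a key numerals ∧ (pvSuffix a key).toList.length = x) := by
          rintro ⟨⟨hb, _, _⟩, _⟩; exact h1 hb
        exact pvOrSkip hnot
      · intro w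
        rw [ihs, hstep, List.exists_mem_cons_iff]
        have hnot : ¬ (pvExactP a key numerals ∧ w ≤ (pvSuffix a key).toList.length) := by
          rintro ⟨⟨hb, _, _⟩, _⟩; exact h1 hb
        exact pvOrSkip hnot

theorem pvScan_snd (dup : List String) (key : String) (numerals : PySem.Set String) (w : Nat) (hw : 1 ≤ w) :
    w ≤ (bScan dup key numerals).2 ↔ ∃ a ∈ dup, pvExactP a key numerals ∧ w ≤ (pvSuffix a key).toList.length := by
  rw [pvBScan_eq]
  have h := ((pvScan_aux key numerals dup (PySem.Set.empty, 0) (by simp [PySem.Set.empty])).2.2) w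
  rw [h]
  simp only [or_iff_right_iff_imp]
  intro hw0
  omega

theorem pvScan_fst (dup : List String) (key : String) (numerals : PySem.Set String) (w : Nat) :
    w ∈ (bScan dup key numerals).1 ↔ ∃ a ∈ dup, pvPadP a key numerals ∧ (pvSuffix a key).toList.length = w := by
  rw [pvBScan_eq]
  have h := ((pvScan_aux key numerals dup (PySem.Set.empty, 0) (by simp [PySem.Set.empty])).2.1) w
  rw [h]
  simp [PySem.Set.empty]

-- A's loop computes the B-loop's width
theorem pvLoop_eq (xs : List String) (key : String) (dup : List String) (hdup : dup.Nodup)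
    (numerals : PySem.Set String)
    (hnum : ∀ t, PySem.Set.contains numerals t = true ↔ ∃ v : Int, 1 ≤ v ∧ v ≤ (xs.length : Int) ∧ t = PySem.Int.toStr v)
    (w : Nat) (hw : 1 ≤ w) :
    aLoop xs key dup hdup w = pvNames key xs.length (bWidth (bScan dup key numerals).1 (bScan dup key numerals).2 w) := by
  have hiff : ∀ w', 1 ≤ w' → ((∃ a ∈ dup, a ∈ pvNames key xs.length w') ↔
      (w' ≤ (bScan dup key numerals).2 ∨ w' ∈ (bScan dup key numerals).1)) := by
    intro w' hw'
    rw [pvScan_snd dup key numerals w' hw', pvScan_fst dup key numerals w']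
    constructor
    · rintro ⟨a, ha, hmem⟩
      rcases (pvMem_names_iff a key xs.length w' numerals hnum).1 hmem with h | h
      · exact Or.inl ⟨a, ha, h⟩
      · exact Or.inr ⟨a, ha, h⟩
    · rintro (⟨a, ha, h⟩ | ⟨a, ha, h⟩)
      · exact ⟨a, ha, (pvMem_names_iff a key xs.length w' numerals hnum).2 (Or.inl h)⟩
      · exact ⟨a, ha, (pvMem_names_iff a key xs.length w' numerals hnum).2 (Or.inr h)⟩
  have hstop : ∀ w', 1 ≤ w' → ¬ (∃ a ∈ dup, a ∈ pvNames key xs.length w') →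
      aLoop xs key dup hdup w' = pvNames key xs.length (bWidth (bScan dup key numerals).1 (bScan dup key numerals).2 w') := by
    intro w' hw' hno
    have hchk : pyCheckDupSets (PySem.Set.ofList (xs.zipIdx.map (fun p => key ++ PySem.Str.zfill (PySem.Int.toStr ((p.2 : Int) + 1)) ((w' : Nat) : Int)))) dup = false := by
      rw [← Bool.not_eq_true, pvCheck_iff hdup, pvNames_zipIdx]
      exact hno
    rw [aLoop]
    simp only [hchk, if_true]
    rw [pvNames_zipIdx, bWidth, if_neg (fun hcond => hno ((hiff w' hw').2 hcond))]
  have main : ∀ k w', 1 ≤ w' → aMaxLen dup + 1 ≤ w' + k →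
      aLoop xs key dup hdup w' = pvNames key xs.length (bWidth (bScan dup key numerals).1 (bScan dup key numerals).2 w') := by
    intro k
    induction k with
    | zero =>
      intro w' hw' hk
      apply hstop w' hw'
      rintro ⟨a, ha, hmem⟩
      have h1 := pvNames_mem_le hmem
      have h2 := aMaxLen_le ha
      omega
    | succ k ih =>
      intro w' hw' hk
      by_cases hex : ∃ a ∈ dup, a ∈ pvNames key xs.length w'
      · have hchk : pyCheckDupSets (PySem.Set.ofList (xs.zipIdx.map (fun p => key ++ PySem.Str.zfill (PySem.Int.toStr ((p.2 : Int) + 1)) ((w' : Nat) : Int)))) dup = true := by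
          rw [pvCheck_iff hdup, pvNames_zipIdx]
          exact hex
        rw [aLoop]
        simp only [hchk]
        rw [if_neg (by simp), bWidth, if_pos ((hiff w' hw').1 hex)]
        have hbound : w' ≤ aMaxLen dup := by
          obtain ⟨a, ha, hmem⟩ := hex
          have h1 := pvNames_mem_le hmem
          have h2 := aMaxLen_le ha
          omega
        exact ih (w' + 1) (by omega) (by omega)
      · exact hstop w' hw' hex
  exact main (aMaxLen dup + 1) w hw (by omega)

-- hdup-irrelevance / congruence in the set argument of A's loop
theorem aLoop_congr {xs : List String} {key : String} {dup dup' : PySem.Set String}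
    {hd : dup.Nodup} (h : dup = dup') {hd' : dup'.Nodup} {w : Nat} :
    aLoop xs key dup hd w = aLoop xs key dup' hd' w := by
  subst h
  rfl

-- ===== VERDICT (by name: the statement is the Claim_ definition above) =====
theorem add_unique_allele_keys_spec : Claim_equal_add_unique_allele_keys := by
  intro fsaL faL key isfx dpfx _
  unfold Spec_add_unique_allele_keys add_unique_allele_keys add_unique_allele_keys_alt
  dsimp only
  have hkfnd : ((PySem.Dict.ofList faL).keys).Nodup := PySem.Dict.nodup_keys_ofList _
  have hfilnd : (((PySem.Dict.ofList faL).keys).filter (fun allele => PySem.Str.isIn key allele)).Nodup := hkfnd.filter _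
  have hdupeq : PySem.Set.ofList ((PySem.Set.ofList ((PySem.Dict.ofList faL).keys)).filter (fun allele => PySem.Str.isIn key allele))
      = ((PySem.Dict.ofList faL).keys).filter (fun allele => PySem.Str.isIn key allele) := by
    rw [PySem.Set.ofList_eq_self_of_nodup _ hkfnd, PySem.Set.ofList_eq_self_of_nodup _ hfilnd]
  have hvl : (PySem.Dict.ofList fsaL).values.length = PySem.Dict.size (PySem.Dict.ofList fsaL) := by
    simp [PySem.Dict.values, PySem.Dict.size]
  have hkl : (PySem.Dict.ofList fsaL).keys.length = PySem.Dict.size (PySem.Dict.ofList fsaL) := by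
    simp [PySem.Dict.keys, PySem.Dict.size]
  by_cases hemp : ((PySem.Dict.ofList faL).keys).filter (fun allele => PySem.Str.isIn key allele) = []
  · -- no key-containing user allele: both use width 2
    have hcondA : PySem.Set.equal (PySem.Set.ofList ((PySem.Set.ofList ((PySem.Dict.ofList faL).keys)).filter (fun allele => PySem.Str.isIn key allele))) PySem.Set.empty = true := by
      rw [PySem.Set.equal_iff, hdupeq, hemp]
      intro x
      rfl
    rw [if_pos hcondA, if_pos hemp]
    have h2cast : ((2 : Nat) : Int) = (2 : Int) := by norm_num
    rw [← h2cast, pvNames_zipIdx, hvl, pvNames_pyRange]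
  · have hcondA : ¬ PySem.Set.equal (PySem.Set.ofList ((PySem.Set.ofList ((PySem.Dict.ofList faL).keys)).filter (fun allele => PySem.Str.isIn key allele))) PySem.Set.empty = true := by
      rw [PySem.Set.equal_iff, hdupeq]
      intro hall
      apply hemp
      apply List.eq_nil_iff_forall_not_mem.2
      intro x hx
      simpa using (hall x).1 hx
    rw [if_neg hcondA, if_neg hemp]
    have hnum : ∀ t, PySem.Set.contains (PySem.Set.ofList ((PySem.List.pyRange 1 ((PySem.Dict.size (PySem.Dict.ofList fsaL) : Int) + 1) 1).map (fun v => PySem.Int.toStr v))) t = true ↔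
        ∃ v : Int, 1 ≤ v ∧ v ≤ (((PySem.Dict.ofList fsaL).keys.length : Nat) : Int) ∧ t = PySem.Int.toStr v := by
      intro t
      rw [PySem.Set.contains_iff, PySem.Set.mem_ofList, List.mem_map, hkl]
      constructor
      · rintro ⟨v, hv, rfl⟩
        rw [PySem.List.mem_pyRange_one] at hv
        exact ⟨v, hv.1, by omega, rfl⟩
      · rintro ⟨v, h1, h2, rfl⟩
        exact ⟨v, PySem.List.mem_pyRange_one.2 ⟨h1, by omega⟩, rfl⟩
    rw [aLoop_congr hdupeq (hd' := hfilnd),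
      pvLoop_eq _ key _ hfilnd _ hnum 3 (by norm_num), hkl, pvNames_pyRange]
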